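-- pv_equiv track=rewrite | github.com/bretgourdie/weakness-subset | weakness-subset.py | getUselessTypes
-- ===== SOURCE A (Python) =====
-- def getUselessTypes(dRankedWeaknessesByPoke):
--     dUselessTypes = {}
--
--     for sPoke, lTypes in dRankedWeaknessesByPoke.items():
--         for tScoreByType in lTypes:
--             sType, iScore = tScoreByType
--
--             if sType not in dUselessTypes:
--                 dUselessTypes[sType] = True
--
--             isUseless = iScore < 1
--             hasAlwaysBeenUseless = dUselessTypes[sType]
--
--             dUselessTypes[sType] = isUseless and hasAlwaysBeenUseless
--
--     lUselessTypes = [sType for sType, isUseless in dUselessTypes.items() if isUseless]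
--
--     return lUselessTypes
-- ===== SOURCE B (Python) =====
-- def getUselessTypes(dRankedWeaknessesByPoke):
--     flat = [entry for lTypes in dRankedWeaknessesByPoke.values() for entry in lTypes]
--     order = list(dict.fromkeys(sType for sType, _ in flat))
--     return [sType for sType in order
--             if all(iScore < 1 for sOther, iScore in flat if sOther == sType)]
-- ===== Notes on version B (the rewrite author's own statement) =====
-- stated objective: alternative
-- what changed: A keeps a per-type boolean dict and ANDs 'score<1' into it while looping; B is stateless staged passes: flatten all entries, dedup the type names in first-seen order, then for each candidate type do a full scan checking all of its scores are < 1.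
import Mathlib
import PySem

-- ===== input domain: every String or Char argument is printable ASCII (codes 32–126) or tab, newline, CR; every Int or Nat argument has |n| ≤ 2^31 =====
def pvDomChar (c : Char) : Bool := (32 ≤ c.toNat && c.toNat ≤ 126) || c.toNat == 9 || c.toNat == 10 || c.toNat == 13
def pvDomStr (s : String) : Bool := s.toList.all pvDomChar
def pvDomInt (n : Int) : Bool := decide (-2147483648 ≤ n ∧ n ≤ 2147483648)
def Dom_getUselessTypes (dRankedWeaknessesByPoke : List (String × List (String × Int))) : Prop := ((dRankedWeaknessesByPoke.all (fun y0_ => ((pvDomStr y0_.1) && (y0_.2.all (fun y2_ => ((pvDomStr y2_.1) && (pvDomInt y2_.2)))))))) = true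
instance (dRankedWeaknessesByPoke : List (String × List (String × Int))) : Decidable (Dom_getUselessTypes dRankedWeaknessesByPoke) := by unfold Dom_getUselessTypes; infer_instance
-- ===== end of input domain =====

-- B replaces A's single pass with a per-type AND-accumulated boolean dict by stateless staged passes: flatten, dedup types in first-seen order, then a full scan per candidate type checking all its scores are < 1.


-- ===== PORT A =====
-- one inner-loop body of A: register the type, then AND 'score < 1' into its flag
def pvAStep (d : PySem.Dict String Bool) (e : String × Int) : PySem.Dict String Bool :=
  let d1 := if d.contains e.1 then d else d.insert e.1 true
  let isUseless := decide (e.2 < 1)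
  let hasAlwaysBeenUseless := d1.getD e.1 true
  d1.insert e.1 (isUseless && hasAlwaysBeenUseless)

def getUselessTypes (dRankedWeaknessesByPoke : List (String × List (String × Int))) : List String :=
  (((dRankedWeaknessesByPoke.foldl (fun d p => p.2.foldl pvAStep d) PySem.Dict.empty).items.filter
      (fun p => p.2)).map (fun p => p.1))

-- ===== PORT B =====
-- the flattened entry list ('flat' in Source B)
def pvFlat (dRankedWeaknessesByPoke : List (String × List (String × Int))) : List (String × Int) :=
  dRankedWeaknessesByPoke.flatMap (fun p => p.2)

def getUselessTypes_alt (dRankedWeaknessesByPoke : List (String × List (String × Int))) : List String :=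
  (PySem.List.dedup ((pvFlat dRankedWeaknessesByPoke).map (fun e => e.1))).filter
    (fun t => ((pvFlat dRankedWeaknessesByPoke).filter (fun e => e.1 == t)).all
      (fun e => decide (e.2 < 1)))

-- ===== PRECONDITION & SPEC =====
def Spec_getUselessTypes (dRankedWeaknessesByPoke : List (String × List (String × Int))) (out : List String) : Prop := out = getUselessTypes_alt dRankedWeaknessesByPoke
instance (dRankedWeaknessesByPoke : List (String × List (String × Int))) (out : List String) : Decidable (Spec_getUselessTypes dRankedWeaknessesByPoke out) := by unfold Spec_getUselessTypes; infer_instance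

-- ===== CLAIM =====
def Claim_equal_getUselessTypes : Prop := ∀ (dRankedWeaknessesByPoke : List (String × List (String × Int))), Dom_getUselessTypes dRankedWeaknessesByPoke → Spec_getUselessTypes dRankedWeaknessesByPoke (getUselessTypes dRankedWeaknessesByPoke)

-- ===== LEMMAS AND PROOFS =====

-- A's nested loops process exactly the flattened entry list
lemma pvA_fold_flat (l : List (String × List (String × Int))) (d : PySem.Dict String Bool) :
    l.foldl (fun d p => p.2.foldl pvAStep d) d = (l.flatMap (fun p => p.2)).foldl pvAStep d := by
  induction l generalizing d with
  | nil => rfl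
  | cons p l ih => simp [List.foldl_append, ih]

-- the per-type flag after processing es: "every entry of es for this type scores < 1"
def pvFlag (es : List (String × Int)) (t : String) : Bool :=
  es.all (fun e => !(e.1 == t) || decide (e.2 < 1))

-- characterisation of A's dict after the loop
lemma pvA_items (es : List (String × Int)) :
    (es.foldl pvAStep PySem.Dict.empty).items
      = (PySem.List.dedup (es.map (fun e => e.1))).map (fun t => (t, pvFlag es t)) := by
  induction es using List.reverseRecOn with
  | nil => rfl
  | append_singleton es e ih =>
    set d := es.foldl pvAStep PySem.Dict.empty with hd
    set fs := PySem.List.dedup (es.map (fun e => e.1)) with hfs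
    have hkeys : d.keys = fs := by
      simp [PySem.Dict.keys, ih, List.map_map, Function.comp_def]
    have hnd : fs.Nodup := by
      rw [hfs, PySem.List.dedup_eq_ofList]; exact PySem.Set.nodup_ofList _
    have hknd : d.keys.Nodup := hkeys ▸ hnd
    have hrhs_order : PySem.List.dedup ((es ++ [e]).map (fun e => e.1))
        = PySem.Set.add fs e.1 := by
      rw [hfs, List.map_append, PySem.List.dedup_eq_ofList, PySem.List.dedup_eq_ofList]
      exact PySem.Set.ofList_append_singleton _ _
    have hflag : ∀ t, pvFlag (es ++ [e]) t
        = (pvFlag es t && (!(e.1 == t) || decide (e.2 < 1))) := by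
      intro t; simp [pvFlag]
    rw [List.foldl_append, List.foldl_cons, List.foldl_nil, hrhs_order]
    by_cases hmem : e.1 ∈ fs
    · have hc : d.contains e.1 = true := (PySem.Dict.contains_iff_mem_keys d e.1).mpr (hkeys ▸ hmem)
      have hmi : (e.1, pvFlag es e.1) ∈ d.items := by
        rw [ih]; exact List.mem_map_of_mem hmem
      have hget : d.getD e.1 true = pvFlag es e.1 :=
        PySem.Dict.getD_of_mem_items d hmi hknd true
      have hadd : PySem.Set.add fs e.1 = fs := by
        simp [PySem.Set.add, hmem]
      rw [hadd]
      simp only [pvAStep]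
      simp only [← hd]
      simp only [hc, if_true, hget]
      rw [PySem.Dict.items_insert_of_contains d _ hc, ih, List.map_map]
      apply List.map_congr_left
      intro t ht
      by_cases hts : t = e.1
      · subst hts; simp [hflag, Bool.and_comm]
      · have hne : ¬ e.1 = t := fun h => hts h.symm
        have h2 : (e.1 == t) = false := by simp [hne]
        simp [hts, h2, hflag]
    · have hc : d.contains e.1 = false := by
        by_contra hcc
        have : d.contains e.1 = true := by revert hcc; cases d.contains e.1 <;> simp
        exact hmem (hkeys ▸ (PySem.Dict.contains_iff_mem_keys d e.1).mp this)
      have hadd : PySem.Set.add fs e.1 = fs ++ [e.1] := by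
        simp [PySem.Set.add, hmem]
      have hc1 : (d.insert e.1 true).contains e.1 = true := PySem.Dict.contains_insert_self d e.1 true
      rw [hadd]
      simp only [pvAStep]
      simp only [← hd]
      simp only [hc, if_false, Bool.false_eq_true]
      rw [PySem.Dict.getD_insert_self, PySem.Dict.items_insert_of_contains _ _ hc1,
        PySem.Dict.items_insert_of_not_contains _ _ hc, ih]
      rw [List.map_append, List.map_append, List.map_map]
      congr 1
      · apply List.map_congr_left
        intro t ht
        have hts : t ≠ e.1 := fun he => hmem (he ▸ ht)
        have hne : ¬ e.1 = t := fun h => hts h.symm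
        have h2 : (e.1 == t) = false := by simp [hne]
        simp [hts, h2, hflag]
      · have hge : pvFlag es e.1 = true := by
          rw [pvFlag, List.all_eq_true]
          intro x hx
          have : x.1 ≠ e.1 := by
            intro hx1
            exact hmem (by rw [hfs, PySem.List.dedup_eq_ofList, PySem.Set.mem_ofList]
                           exact hx1 ▸ List.mem_map_of_mem hx)
          simp [this]
        simp [hflag, hge]

-- B's per-candidate filtered scan equals the flag
lemma pvB_flag (es : List (String × Int)) (t : String) :
    (es.filter (fun e => e.1 == t)).all (fun e => decide (e.2 < 1)) = pvFlag es t := by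
  induction es with
  | nil => rfl
  | cons e es ih =>
    by_cases h : e.1 = t
    · simp [pvFlag, h] at ih ⊢
    · have h2 : (e.1 == t) = false := by simp [h]
      simp only [List.filter_cons, h2, Bool.false_eq_true, if_false, pvFlag, List.all_cons,
        Bool.not_false, Bool.true_or, Bool.true_and] at ih ⊢
      exact ih

-- ===== VERDICT =====
theorem getUselessTypes_spec : Claim_equal_getUselessTypes := by
  intro l _
  have hB : getUselessTypes_alt l
      = (PySem.List.dedup ((pvFlat l).map (fun e => e.1))).filter (fun t => pvFlag (pvFlat l) t) := by
    unfold getUselessTypes_alt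
    exact List.filter_congr (fun t _ => pvB_flag _ t)
  have hA : getUselessTypes l
      = (PySem.List.dedup ((pvFlat l).map (fun e => e.1))).filter (fun t => pvFlag (pvFlat l) t) := by
    unfold getUselessTypes
    rw [pvA_fold_flat]
    rw [show l.flatMap (fun p => p.2) = pvFlat l from rfl]
    rw [pvA_items, List.filter_map, List.map_map]
    simp [Function.comp_def]
  unfold Spec_getUselessTypes
  rw [hA, hB]
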